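-- pv_equiv track=rewrite | github.com/mkovac/TowerSums | python/packingHelper.py | pack4E4M_FromInt
-- ===== SOURCE A (Python) =====
-- def pack4E4M_FromInt(energy): #Take input integer and pack it into 4E4M format
--     assert(energy<0x80000);#make sure input is an 19 bit number
--
--     if(energy<16): #here the max number is 16 because mantissa has 4 bits, 2^4=16
--         return int(energy)
--     e = 1
--     while(energy>=32):
--         e+=1
--         energy>>=1
--     return int(16*(e-1)+energy) #format it in as 16 bits = eeeemmm, where first 4 are exponent and last 4 are (mantissa - 16)
-- ===== SOURCE B (Python) =====
-- def pack4E4M_FromInt(energy): #Take input integer and pack it into 4E4M format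
--     assert(energy<0x80000) #make sure input is an 19 bit number
--     if energy < 16: #here the max number is 16 because mantissa has 4 bits, 2^4=16
--         return int(energy)
--     # closed form: the loop shifts until energy < 32, i.e. bit_length()-5 times
--     e = energy.bit_length() - 4
--     return int(16*(e-1) + (energy >> (e-1)))
-- ===== Notes on version B (the rewrite author's own statement) =====
-- stated objective: simpler
-- what changed: Replaces the while-loop that repeatedly halves the energy while counting shifts with a closed form computed from energy.bit_length().
import Mathlib
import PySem

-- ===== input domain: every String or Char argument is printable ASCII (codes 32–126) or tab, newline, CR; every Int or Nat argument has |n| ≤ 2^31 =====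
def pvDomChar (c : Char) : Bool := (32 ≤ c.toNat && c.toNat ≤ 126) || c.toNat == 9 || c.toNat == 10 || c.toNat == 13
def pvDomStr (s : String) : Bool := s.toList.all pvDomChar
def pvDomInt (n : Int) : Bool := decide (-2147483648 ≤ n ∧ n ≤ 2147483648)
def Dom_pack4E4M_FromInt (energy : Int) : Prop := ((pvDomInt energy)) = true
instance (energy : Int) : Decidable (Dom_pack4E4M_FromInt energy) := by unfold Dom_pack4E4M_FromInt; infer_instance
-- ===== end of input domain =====

-- B replaces A's normalization while-loop by a closed form from the bit length (objective: simpler).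

-- ===== PORT A =====
-- the while-loop: 'while energy >= 32: e += 1; energy >>= 1' (>>1 on an int = floor division by 2)
def packLoopA (e : Int) (energy : Int) : Int × Int :=
  if h : 32 ≤ energy then packLoopA (e + 1) (PySem.Int.floordiv energy 2)
  else (e, energy)
termination_by energy.toNat
decreasing_by
  rw [PySem.Int.floordiv_eq_ediv_of_pos (by omega : (0:Int) < 2)]; omega

def pack4E4M_FromInt (energy : Int) : Int :=
  -- assert energy < 0x80000 → Pre_; below it A returns normally
  if energy < 16 then energy
  else
    let p := packLoopA 1 energy
    16 * (p.1 - 1) + p.2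

-- ===== PORT B =====
-- energy >> k for the nonnegative energy and k B uses; exact there (Python >> on ints)
def pyShrB (n : Int) (k : Nat) : Int := ((n.toNat >>> k : Nat) : Int)

def pack4E4M_FromInt_alt (energy : Int) : Int :=
  if energy < 16 then energy
  else
    let e : Int := (PySem.Int.bitLength energy : Int) - 4   -- energy.bit_length() - 4
    16 * (e - 1) + pyShrB energy (e - 1).toNat

-- ===== PRECONDITION & SPEC =====
-- Pre_ excludes energy ≥ 0x80000, where A's assert raises AssertionError.
def Pre_pack4E4M_FromInt (energy : Int) : Prop := energy < 524288
instance (energy : Int) : Decidable (Pre_pack4E4M_FromInt energy) := by unfold Pre_pack4E4M_FromInt; infer_instance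
def pvWitness_pack4E4M_FromInt : Int := 100

def Spec_pack4E4M_FromInt (energy : Int) (out : Int) : Prop := out = pack4E4M_FromInt_alt energy
instance (energy : Int) (out : Int) : Decidable (Spec_pack4E4M_FromInt energy out) := by unfold Spec_pack4E4M_FromInt; infer_instance

-- ===== CLAIM (what is proved, stated in full; the proofs are below) =====
def Claim_equal_pack4E4M_FromInt : Prop := ∀ (energy : Int), Dom_pack4E4M_FromInt energy → Pre_pack4E4M_FromInt energy → Spec_pack4E4M_FromInt energy (pack4E4M_FromInt energy)

-- ===== LEMMAS AND PROOFS =====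

-- bit length of n ∈ [16, 32) is 5
lemma bitLength_of_16_32 (n : Int) (h1 : 16 ≤ n) (h2 : n < 32) :
    PySem.Int.bitLength n = 5 := by
  have hlt := PySem.Int.lt_two_pow_bitLength n
  have hle := PySem.Int.two_pow_bitLength_le n (by omega)
  have hna : n.natAbs < 32 ∧ 16 ≤ n.natAbs := by omega
  refine le_antisymm ?_ ?_
  · by_contra h
    have : 2 ^ 5 ≤ 2 ^ (PySem.Int.bitLength n - 1) := Nat.pow_le_pow_right (by norm_num) (by omega)
    omega
  · by_contra h
    have : 2 ^ PySem.Int.bitLength n ≤ 2 ^ 4 := Nat.pow_le_pow_right (by norm_num) (by omega)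
    omega

lemma bitLength_ge_six (n : Int) (h : 32 ≤ n) : 6 ≤ PySem.Int.bitLength n := by
  have hlt := PySem.Int.lt_two_pow_bitLength n
  by_contra hc
  have : 2 ^ PySem.Int.bitLength n ≤ 2 ^ 5 := Nat.pow_le_pow_right (by norm_num) (by omega)
  omega

-- the loop's result in terms of the bit length
lemma packLoopA_char : ∀ (k : Nat) (n : Int), n.toNat ≤ k → 16 ≤ n → ∀ e : Int,
    packLoopA e n = (e + (PySem.Int.bitLength n : Int) - 5,
                     ((n.toNat >>> (PySem.Int.bitLength n - 5) : Nat) : Int)) := by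
  intro k
  induction k with
  | zero => intro n hk hn; omega
  | succ k ih =>
    intro n hk hn e
    rw [packLoopA]
    by_cases h32 : 32 ≤ n
    · simp only [h32, dif_pos]
      have hfd : PySem.Int.floordiv n 2 = ((n.toNat / 2 : Nat) : Int) := by
        rw [PySem.Int.floordiv_eq_ediv_of_pos (by omega : (0:Int) < 2)]; omega
      have hbl : PySem.Int.bitLength n = PySem.Int.bitLength (PySem.Int.floordiv n 2) + 1 :=
        PySem.Int.bitLength_of_pos (by omega)
      have h6 := bitLength_ge_six n h32
      rw [ih (PySem.Int.floordiv n 2) (by rw [hfd]; omega) (by rw [hfd]; omega)]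
      rw [hfd] at hbl ⊢
      rw [Prod.mk.injEq]
      constructor
      · simp only [hbl]; push_cast; ring
      · congr 1
        have hsub : PySem.Int.bitLength ((n.toNat / 2 : Nat) : Int) - 5
            = PySem.Int.bitLength n - 6 := by omega
        rw [Int.toNat_natCast, hsub, Nat.shiftRight_eq_div_pow, Nat.shiftRight_eq_div_pow,
            Nat.div_div_eq_div_mul]
        congr 1
        have : PySem.Int.bitLength n - 5 = (PySem.Int.bitLength n - 6) + 1 := by omega
        rw [this, pow_succ]; ring
    · simp only [h32, dif_neg, not_false_iff]
      have h5 : PySem.Int.bitLength n = 5 := bitLength_of_16_32 n hn (by omega)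
      rw [h5]
      rw [Prod.mk.injEq]
      constructor
      · push_cast; ring
      · simp [Nat.shiftRight_eq_div_pow]; omega

-- ===== VERDICT (by name: the statement is the Claim_ definition above) =====
theorem pack4E4M_FromInt_spec : Claim_equal_pack4E4M_FromInt := by
  intro energy _ _
  unfold Spec_pack4E4M_FromInt pack4E4M_FromInt pack4E4M_FromInt_alt
  by_cases h : energy < 16
  · simp [h]
  · simp only [h, if_neg, not_false_iff]
    have h16 : 16 ≤ energy := by omega
    have hbl5 : 5 ≤ PySem.Int.bitLength energy := by
      have := PySem.Int.lt_two_pow_bitLength energy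
      by_contra hc
      have : 2 ^ PySem.Int.bitLength energy ≤ 2 ^ 4 := Nat.pow_le_pow_right (by norm_num) (by omega)
      omega
    rw [packLoopA_char energy.toNat energy le_rfl h16 1]
    simp only [pyShrB]
    have htn : ((PySem.Int.bitLength energy : Int) - 4 - 1).toNat = PySem.Int.bitLength energy - 5 := by
      omega
    rw [htn]
    push_cast
    ring
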